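-- pv_equiv track=rewrite | github.com/Seppohto/AoC2022 | 17-2.py | initiate_rocks
-- ===== SOURCE A (Python) =====
-- def initiate_rocks(rocks, chamber, rock_type, highest_rock):
--     #if top of the chamber is not 3 units above the highest rock increase the chamber height so that it is
--     while len(chamber) - highest_rock != 3+len(rocks[rock_type]):
--         #if the difference between the height of the chamber and the highest rock is less than 3+the height of the rock
--         if len(chamber) - highest_rock < 3+len(rocks[rock_type]):
--             chamber.insert(0, ["."]*7)
--         else:
--             chamber.pop(0)
--     #initate the rock at the top and two units away from the left wall
--     for i in range(len(rocks[rock_type])):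
--         for j in range(len(rocks[rock_type][i])):
--             if rocks[rock_type][i][j] == "#":
--                 chamber[i][j+2] = "@"
--
--     return chamber
-- ===== SOURCE B (Python) =====
-- def initiate_rocks(rocks, chamber, rock_type, highest_rock):
--     # Builds the result buffer from scratch (does not mutate `chamber`, unlike A):
--     # each output row is fetched from the old chamber via an arithmetic index shift
--     # (or is a fresh empty row), and rows overlapping the rock are rebuilt stamped.
--     rock = rocks[rock_type]
--     n = highest_rock + 3 + len(rock)
--     shift = len(chamber) - n
--     out = []
--     for i in range(n):
--         base = chamber[i + shift] if i + shift >= 0 else ["."] * 7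
--         if i < len(rock):
--             rrow = rock[i]
--             base = ["@" if 2 <= j < 2 + len(rrow) and rrow[j - 2] == "#" else c
--                     for j, c in enumerate(base)]
--         out.append(base)
--     return out
-- ===== Notes on version B (the rewrite author's own statement) =====
-- stated objective: alternative
-- what changed: B never touches the given buffer: it builds the output chamber from scratch in one pass over output row indices, fetching each row from the old chamber via an arithmetic index shift (or a fresh empty row) and rebuilding rock-overlapping rows with a stamping comprehension, instead of A's in-place resize-by-repeated-insert/pop while-loop followed by per-cell index assignments.
import Mathlib
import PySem

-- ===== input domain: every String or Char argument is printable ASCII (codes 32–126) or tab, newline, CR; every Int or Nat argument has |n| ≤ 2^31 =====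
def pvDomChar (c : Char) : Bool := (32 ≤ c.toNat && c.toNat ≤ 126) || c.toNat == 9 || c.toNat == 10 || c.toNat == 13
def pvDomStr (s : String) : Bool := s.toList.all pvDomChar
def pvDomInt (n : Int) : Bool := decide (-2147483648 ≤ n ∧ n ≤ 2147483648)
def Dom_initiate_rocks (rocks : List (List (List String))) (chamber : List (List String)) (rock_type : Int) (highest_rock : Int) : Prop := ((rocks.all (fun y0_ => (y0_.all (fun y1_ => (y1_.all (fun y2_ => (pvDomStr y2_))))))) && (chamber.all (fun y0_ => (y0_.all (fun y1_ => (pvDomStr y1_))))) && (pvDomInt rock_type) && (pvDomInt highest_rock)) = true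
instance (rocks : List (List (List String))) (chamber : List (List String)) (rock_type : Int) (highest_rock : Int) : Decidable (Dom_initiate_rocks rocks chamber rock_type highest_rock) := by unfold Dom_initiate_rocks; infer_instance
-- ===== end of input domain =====

-- B builds the output chamber from scratch in one pass over output row indices (index-shift
-- fetch or fresh row, rock rows rebuilt by a stamping comprehension) instead of A's in-place
-- insert/pop resize loop plus per-cell writes. A mutates `chamber` in place, B does not:
-- the equivalence proved here is about the return value only.

-- ===== PORT A =====
-- the while-loop: insert a fresh 7-wide row at the front / pop the front
-- until len(chamber) - highest_rock == k  (k = 3 + len(rocks[rock_type]))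
def pvResizeA (hr k : Int) : Nat → List (List String) → List (List String)
  | 0, ch => ch
  | fuel + 1, ch =>
    if (ch.length : Int) - hr = k then ch
    else if (ch.length : Int) - hr < k then pvResizeA hr k fuel (List.replicate 7 "." :: ch)
    else pvResizeA hr k fuel ch.tail   -- chamber.pop(0); on an empty chamber Python raises IndexError (excluded by Pre_)

def initiate_rocks (rocks : List (List (List String))) (chamber : List (List String)) (rock_type : Int) (highest_rock : Int) : List (List String) :=
  let rock := (PySem.List.pyGet? rocks rock_type).getD []   -- rocks[rock_type]; none = IndexError, excluded by Pre_
  let ch := pvResizeA highest_rock (3 + (rock.length : Int)) (((chamber.length : Int) - (highest_rock + (3 + (rock.length : Int)))).natAbs) chamber   -- fuel = exact number of loop iterations (totality guard only)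
  -- for i in range(len(rock)): for j in range(len(rock[i])): if rock[i][j] == "#": chamber[i][j+2] = "@"
  (List.range rock.length).foldl (fun ch i =>
    (List.range ((rock.getD i []).length)).foldl (fun ch j =>
      if (rock.getD i []).getD j "" = "#" then
        ch.set i (((ch.getD i []).set (j + 2)) "@")   -- out-of-range writes are Python IndexErrors, excluded by Pre_
      else ch) ch) ch

-- ===== PORT B =====
-- the comprehension: '@' where the rock row has '#' (shifted right by 2), else the old cell
def pvStampRow (rrow : List String) (row : List String) : List String :=
  row.zipIdx.map (fun cj =>
    if 2 ≤ cj.2 ∧ cj.2 - 2 < rrow.length ∧ rrow.getD (cj.2 - 2) "" = "#" then "@" else cj.1)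

def initiate_rocks_alt (rocks : List (List (List String))) (chamber : List (List String)) (rock_type : Int) (highest_rock : Int) : List (List String) :=
  let rock := (PySem.List.pyGet? rocks rock_type).getD []
  let n := highest_rock + 3 + (rock.length : Int)
  let shift := (chamber.length : Int) - n
  (List.range n.toNat).map (fun (i : Nat) =>
    let base := if 0 ≤ (i : Int) + shift then chamber.getD ((i : Int) + shift).toNat [] else List.replicate 7 "."
    if i < rock.length then pvStampRow (rock.getD i []) base else base)

-- ===== PRECONDITION & SPEC =====
-- Pre_ admits exactly the inputs on which Python A returns: a valid rock index, a nonnegative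
-- target height (otherwise the pop-branch of the while-loop empties the chamber and pop(0)
-- raises IndexError), and every '#' cell stamped inside the bounds of the resized chamber
-- (otherwise chamber[i][j+2] = "@" raises IndexError).
def Pre_initiate_rocks (rocks : List (List (List String))) (chamber : List (List String)) (rock_type : Int) (highest_rock : Int) : Prop :=
  (PySem.List.pyGet? rocks rock_type).isSome = true ∧
  (let rock := (PySem.List.pyGet? rocks rock_type).getD []
   let n := highest_rock + 3 + (rock.length : Int)
   let shift := (chamber.length : Int) - n
   (decide (0 ≤ n) &&
    rock.zipIdx.all (fun ri =>
      ri.1.zipIdx.all (fun sj =>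
        !(sj.1 == "#") ||
          (decide ((ri.2 : Int) < n) &&
           decide (sj.2 + 2 <
             (if 0 ≤ (ri.2 : Int) + shift then (chamber.getD ((ri.2 : Int) + shift).toNat []).length else 7)))))) = true)
instance (rocks : List (List (List String))) (chamber : List (List String)) (rock_type : Int) (highest_rock : Int) : Decidable (Pre_initiate_rocks rocks chamber rock_type highest_rock) := by unfold Pre_initiate_rocks; infer_instance

def pvWitness_initiate_rocks : List (List (List String)) × List (List String) × Int × Int := ([[["#"]]], [], 0, 0)

def Spec_initiate_rocks (rocks : List (List (List String))) (chamber : List (List String)) (rock_type : Int) (highest_rock : Int) (out : List (List String)) : Prop := out = initiate_rocks_alt rocks chamber rock_type highest_rock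
instance (rocks : List (List (List String))) (chamber : List (List String)) (rock_type : Int) (highest_rock : Int) (out : List (List String)) : Decidable (Spec_initiate_rocks rocks chamber rock_type highest_rock out) := by unfold Spec_initiate_rocks; infer_instance

-- ===== CLAIM (what is proved, stated in full; the proofs are below) =====
def Claim_equal_initiate_rocks : Prop := ∀ (rocks : List (List (List String))) (chamber : List (List String)) (rock_type : Int) (highest_rock : Int), Dom_initiate_rocks rocks chamber rock_type highest_rock → Pre_initiate_rocks rocks chamber rock_type highest_rock → Spec_initiate_rocks rocks chamber rock_type highest_rock (initiate_rocks rocks chamber rock_type highest_rock)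

-- ===== LEMMAS AND PROOFS =====

-- the while-loop, growing side: m inserts reach the target height
lemma pv_resize_grow (hr k : Int) : ∀ (m : Nat) (ch : List (List String)),
    (ch.length : Int) + m = hr + k →
    pvResizeA hr k m ch = List.replicate m (List.replicate 7 ".") ++ ch := by
  intro m
  induction m with
  | zero => intro ch h; simp [pvResizeA]
  | succ m ih =>
    intro ch h
    rw [pvResizeA]
    have h1 : ¬ ((ch.length : Int) - hr = k) := by omega
    have h2 : (ch.length : Int) - hr < k := by omega
    rw [if_neg h1, if_pos h2, ih _ (by simp only [List.length_cons]; push_cast; omega)]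
    simp only [List.replicate_succ', List.append_assoc, List.singleton_append]

-- the while-loop, shrinking side: m pops drop the front down to the target height
lemma pv_resize_shrink (hr k : Int) : ∀ (m : Nat) (ch : List (List String)),
    (ch.length : Int) - m = hr + k → 0 ≤ hr + k →
    pvResizeA hr k m ch = ch.drop m := by
  intro m
  induction m with
  | zero => intro ch h h0; simp [pvResizeA]
  | succ m ih =>
    intro ch h h0
    rw [pvResizeA]
    have hne : ch.length ≠ 0 := by
      intro hz
      rw [hz] at h
      simp only [Nat.cast_zero] at h
      omega
    have htl : ch.tail.length = ch.length - 1 := List.length_tail ..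
    have h1 : ¬ ((ch.length : Int) - hr = k) := by omega
    have h2 : ¬ ((ch.length : Int) - hr < k) := by omega
    rw [if_neg h1, if_neg h2, ih ch.tail (by rw [htl]; push_cast [Nat.cast_sub (by omega : 1 ≤ ch.length)]; omega) h0]
    rw [← List.drop_one, List.drop_drop, Nat.add_comm]

-- the whole while-loop (with its exact fuel) equals a one-shot delta resize (nonnegative target)
lemma pv_resize_eq (hr k : Int) (ch : List (List String)) (h0 : 0 ≤ hr + k) :
    pvResizeA hr k ((ch.length : Int) - (hr + k)).natAbs ch =
      (if 0 < hr + k - (ch.length : Int) then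
         List.replicate (hr + k - (ch.length : Int)).toNat (List.replicate 7 ".") ++ ch
       else if hr + k - (ch.length : Int) < 0 then ch.drop (-(hr + k - (ch.length : Int))).toNat
       else ch) := by
  by_cases h1 : 0 < hr + k - (ch.length : Int)
  · rw [if_pos h1]
    have hm : ((ch.length : Int) - (hr + k)).natAbs = (hr + k - (ch.length : Int)).toNat := by omega
    rw [hm, pv_resize_grow hr k (hr + k - (ch.length : Int)).toNat ch (by omega)]
  · rw [if_neg h1]
    have hm : ((ch.length : Int) - (hr + k)).natAbs = ((ch.length : Int) - (hr + k)).toNat := by omega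
    rw [hm, pv_resize_shrink hr k ((ch.length : Int) - (hr + k)).toNat ch (by omega) h0]
    by_cases h2 : hr + k - (ch.length : Int) < 0
    · rw [if_pos h2]
      congr 1
      omega
    · rw [if_neg h2]
      have : ((ch.length : Int) - (hr + k)).toNat = 0 := by omega
      simp [this]

lemma pv_getD_out (ch : List (List String)) (i : Nat) (h : ¬ i < ch.length) : ch.getD i [] = [] := by
  rw [List.getD_eq_getElem?_getD, List.getElem?_eq_none (by omega)]; rfl

lemma pv_set_getD_self (ch : List (List String)) (i : Nat) : ch.set i (ch.getD i []) = ch := by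
  by_cases hi : i < ch.length
  · rw [List.getD_eq_getElem ch [] hi]
    exact List.set_getElem_self hi
  · rw [pv_getD_out ch i hi, List.set_eq_of_length_le (by omega)]

lemma pv_getD_set_self (ch : List (List String)) (i : Nat) (r : List String)
    (hr : (ch.getD i []) = [] → r = []) : (ch.set i r).getD i [] = r := by
  by_cases hi : i < ch.length
  · simp [List.getD_eq_getElem?_getD, hi]
  · rw [List.set_eq_of_length_le (by omega), pv_getD_out ch i hi]
    exact (hr (pv_getD_out ch i hi)).symm

lemma pv_getD_set_ne (ch : List (List String)) (i j : Nat) (r : List String) (h : i ≠ j) :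
    (ch.set i r).getD j [] = ch.getD j [] := by
  simp [List.getD_eq_getElem?_getD, List.getElem?_set_ne h]

-- A's inner j-loop over the whole chamber is a single set of the row-level fold
lemma pv_inner_set (rrow : List String) (i : Nat) : ∀ (l : List Nat) (ch : List (List String)),
    l.foldl (fun ch j => if rrow.getD j "" = "#" then ch.set i ((ch.getD i []).set (j + 2) "@") else ch) ch
      = ch.set i (l.foldl (fun r j => if rrow.getD j "" = "#" then r.set (j + 2) "@" else r) (ch.getD i [])) := by
  intro l
  induction l with
  | nil => intro ch; simp only [List.foldl_nil]; exact (pv_set_getD_self ch i).symm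
  | cons j l ih =>
    intro ch
    simp only [List.foldl_cons]
    by_cases hp : rrow.getD j "" = "#"
    · simp only [if_pos hp]
      rw [ih, pv_getD_set_self ch i _ (by intro h; rw [h]; rfl), List.set_set]
    · simp only [if_neg hp]
      exact ih ch

lemma pv_row_fold_len (rrow : List String) : ∀ (l : List Nat) (row : List String),
    (l.foldl (fun r j => if rrow.getD j "" = "#" then r.set (j + 2) "@" else r) row).length = row.length := by
  intro l
  induction l with
  | nil => intro row; rfl
  | cons j l ih =>
    intro row
    simp only [List.foldl_cons]
    by_cases hp : rrow.getD j "" = "#"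
    · simp only [if_pos hp, ih, List.length_set]
    · simp only [if_neg hp, ih]

lemma pv_getD_set_ne_str (l : List String) (i j : Nat) (a : String) (h : i ≠ j) :
    (l.set i a).getD j "" = l.getD j "" := by
  simp [List.getD_eq_getElem?_getD, List.getElem?_set_ne h]

-- cell-level characterisation of A's row fold
lemma pv_row_fold_getD (rrow row : List String)
    (hb : ∀ j < rrow.length, rrow.getD j "" = "#" → j + 2 < row.length) :
    ∀ n, n ≤ rrow.length → ∀ m,
      ((List.range n).foldl (fun r j => if rrow.getD j "" = "#" then r.set (j + 2) "@" else r) row).getD m ""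
        = if 2 ≤ m ∧ m - 2 < n ∧ rrow.getD (m - 2) "" = "#" then "@" else row.getD m "" := by
  intro n
  induction n with
  | zero => intro _ m; simp
  | succ n ih =>
    intro hn m
    rw [List.range_succ, List.foldl_append, List.foldl_cons, List.foldl_nil]
    by_cases hp : rrow.getD n "" = "#"
    · simp only [if_pos hp]
      have hlen : n + 2 < ((List.range n).foldl (fun r j => if rrow.getD j "" = "#" then r.set (j + 2) "@" else r) row).length := by
        rw [pv_row_fold_len]
        exact hb n (by omega) hp
      by_cases hm : m = n + 2
      · subst hm
        have h1 : (((List.range n).foldl (fun r j => if rrow.getD j "" = "#" then r.set (j + 2) "@" else r) row).set (n + 2) "@").getD (n + 2) "" = "@" := by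
          rw [List.getD_eq_getElem?_getD, List.getElem?_set_self hlen]; rfl
        rw [h1, if_pos ⟨by omega, by omega, by simpa using hp⟩]
      · rw [pv_getD_set_ne_str _ _ _ _ (by omega), ih (by omega) m]
        by_cases hc1 : 2 ≤ m ∧ m - 2 < n ∧ rrow.getD (m - 2) "" = "#"
        · rw [if_pos hc1, if_pos ⟨hc1.1, by omega, hc1.2.2⟩]
        · rw [if_neg hc1]
          by_cases hc2 : 2 ≤ m ∧ m - 2 < n + 1 ∧ rrow.getD (m - 2) "" = "#"
          · exfalso
            have hm2 : m - 2 = n := by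
              rcases hc2 with ⟨h2, h3, h4⟩
              by_cases hlt : m - 2 < n
              · exact absurd ⟨h2, hlt, h4⟩ hc1
              · omega
            exact hm (by omega)
          · rw [if_neg hc2]
    · simp only [if_neg hp]
      rw [ih (by omega) m]
      by_cases hc1 : 2 ≤ m ∧ m - 2 < n ∧ rrow.getD (m - 2) "" = "#"
      · rw [if_pos hc1, if_pos ⟨hc1.1, by omega, hc1.2.2⟩]
      · rw [if_neg hc1]
        by_cases hc2 : 2 ≤ m ∧ m - 2 < n + 1 ∧ rrow.getD (m - 2) "" = "#"
        · exfalso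
          rcases hc2 with ⟨h2, h3, h4⟩
          by_cases hlt : m - 2 < n
          · exact absurd ⟨h2, hlt, h4⟩ hc1
          · have : m - 2 = n := by omega
            exact hp (this ▸ h4)
        · rw [if_neg hc2]

-- A's per-cell row fold equals B's one-pass row rebuild (all '#' writes in range)
lemma pv_row_fold_eq_stampRow (rrow row : List String)
    (hb : ∀ j < rrow.length, rrow.getD j "" = "#" → j + 2 < row.length) :
    (List.range rrow.length).foldl (fun r j => if rrow.getD j "" = "#" then r.set (j + 2) "@" else r) row
      = pvStampRow rrow row := by
  apply List.ext_getElem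
  · rw [pv_row_fold_len]
    simp [pvStampRow]
  · intro m h1 h2
    have hm : m < row.length := by rw [pv_row_fold_len] at h1; exact h1
    have hL : ((List.range rrow.length).foldl (fun r j => if rrow.getD j "" = "#" then r.set (j + 2) "@" else r) row)[m]
        = ((List.range rrow.length).foldl (fun r j => if rrow.getD j "" = "#" then r.set (j + 2) "@" else r) row).getD m "" := by
      rw [List.getD_eq_getElem _ _ h1]
    rw [hL, pv_row_fold_getD rrow row hb rrow.length le_rfl m]
    have hR : (pvStampRow rrow row)[m]'h2
        = if 2 ≤ m ∧ m - 2 < rrow.length ∧ rrow.getD (m - 2) "" = "#" then "@" else row[m]'hm := by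
      simp only [pvStampRow, List.getElem_map, List.getElem_zipIdx]
      simp
    rw [hR, List.getD_eq_getElem row "" hm]

-- the row fold leaves an empty row empty (out-of-range sets are no-ops)
lemma pv_row_fold_nil (rrow : List String) (l : List Nat) :
    (l.foldl (fun r j => if rrow.getD j "" = "#" then r.set (j + 2) "@" else r) ([] : List String)) = [] := by
  have := pv_row_fold_len rrow l []
  rwa [List.length_nil, List.length_eq_zero_iff] at this

-- elementwise description of A's outer fold (set row i to its stamped row fold)
lemma pv_foldA_len (rock : List (List String)) :
    ∀ (l : List Nat) (ch : List (List String)),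
    (l.foldl (fun ch i => ch.set i ((List.range ((rock.getD i []).length)).foldl
        (fun r j => if (rock.getD i []).getD j "" = "#" then r.set (j + 2) "@" else r) (ch.getD i []))) ch).length = ch.length := by
  intro l
  induction l with
  | nil => intro ch; rfl
  | cons i l ih => intro ch; simp only [List.foldl_cons, ih, List.length_set]

lemma pv_foldA_getD (rock : List (List String)) :
    ∀ (k : Nat) (ch : List (List String)) (m : Nat),
    ((List.range k).foldl (fun ch i => ch.set i ((List.range ((rock.getD i []).length)).foldl
        (fun r j => if (rock.getD i []).getD j "" = "#" then r.set (j + 2) "@" else r) (ch.getD i []))) ch).getD m []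
      = if m < k then
          (List.range ((rock.getD m []).length)).foldl
            (fun r j => if (rock.getD m []).getD j "" = "#" then r.set (j + 2) "@" else r) (ch.getD m [])
        else ch.getD m [] := by
  intro k
  induction k with
  | zero => intro ch m; simp
  | succ k ih =>
    intro ch m
    rw [List.range_succ, List.foldl_append, List.foldl_cons, List.foldl_nil]
    by_cases hm : m = k
    · subst hm
      have hk : ((List.range m).foldl (fun ch i => ch.set i ((List.range ((rock.getD i []).length)).foldl
          (fun r j => if (rock.getD i []).getD j "" = "#" then r.set (j + 2) "@" else r) (ch.getD i []))) ch).getD m [] = ch.getD m [] := by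
        rw [ih]; simp
      rw [hk, pv_getD_set_self _ _ _ (by intro h; rw [hk] at h; rw [h, pv_row_fold_nil]), if_pos (by omega)]
    · rw [pv_getD_set_ne _ _ _ _ (by omega), ih]
      by_cases h2 : m < k
      · rw [if_pos h2, if_pos (by omega)]
      · rw [if_neg h2, if_neg (by omega)]

-- A = B on every input Pre_ admits
lemma pv_main (rocks : List (List (List String))) (chamber : List (List String)) (rock_type : Int) (highest_rock : Int)
    (hpre : Pre_initiate_rocks rocks chamber rock_type highest_rock) :
    initiate_rocks rocks chamber rock_type highest_rock = initiate_rocks_alt rocks chamber rock_type highest_rock := by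
  simp only [Pre_initiate_rocks] at hpre
  obtain ⟨hsome, hb⟩ := hpre
  set rock := (PySem.List.pyGet? rocks rock_type).getD [] with hrock
  set n : Int := highest_rock + 3 + (rock.length : Int) with hn
  set shift : Int := (chamber.length : Int) - n with hshift
  set R : List (List String) :=
    (if 0 < n - (chamber.length : Int) then
       List.replicate (n - (chamber.length : Int)).toNat (List.replicate 7 ".") ++ chamber
     else if n - (chamber.length : Int) < 0 then chamber.drop (-(n - (chamber.length : Int))).toNat
     else chamber) with hR
  rw [Bool.and_eq_true, decide_eq_true_iff] at hb
  obtain ⟨ht, hall⟩ := hb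
  rw [List.all_eq_true] at hall
  -- the resized chamber has exactly n rows
  have hRlen : R.length = n.toNat := by
    rw [hR]
    split_ifs with h1 h2
    · simp only [List.length_append, List.length_replicate]; omega
    · simp only [List.length_drop]; omega
    · omega
  -- each resized row is B's base row
  have hbase : ∀ i < n.toNat,
      R.getD i [] = (if 0 ≤ (i : Int) + shift then chamber.getD ((i : Int) + shift).toNat [] else List.replicate 7 ".") := by
    intro i hi
    rw [hR, hshift]
    split_ifs with h1 h2 h3 h4 h5
    · -- grow, but 0 ≤ i + shift, i.e. past the prepended rows
      rw [List.getD_eq_getElem?_getD, List.getElem?_append_right (by simp only [List.length_replicate]; omega)]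
      simp only [List.length_replicate]
      rw [← List.getD_eq_getElem?_getD]
      congr 1
      omega
    · -- grow, inside the fresh prefix
      rw [List.getD_eq_getElem?_getD, List.getElem?_append_left (by simp only [List.length_replicate]; omega),
          List.getElem?_replicate]
      rw [if_pos (by omega)]
      rfl
    · -- shrink
      rw [List.getD_eq_getElem?_getD, List.getElem?_drop, ← List.getD_eq_getElem?_getD]
      congr 1
      omega
    · omega
    · -- unchanged
      congr 1
      omega
    · omega
  have hcells : ∀ i < rock.length, ∀ j < (rock.getD i []).length,
      (rock.getD i []).getD j "" = "#" → i < R.length ∧ j + 2 < (R.getD i []).length := by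
    intro i hi j hj hs
    have hmem : ((rock.getD i []), i) ∈ rock.zipIdx := by
      rw [List.getD_eq_getElem _ _ hi]
      have h := List.getElem_mem (l := rock.zipIdx) (n := i) (by simpa using hi)
      simpa using h
    have hrow := hall _ hmem
    rw [List.all_eq_true] at hrow
    have hmem2 : ((rock.getD i []).getD j "", j) ∈ (rock.getD i []).zipIdx := by
      rw [List.getD_eq_getElem _ _ hj]
      have h := List.getElem_mem (l := (rock.getD i []).zipIdx) (n := j) (by simpa using hj)
      simpa using h
    have hc := hrow _ hmem2
    rw [hs] at hc
    simp only [beq_self_eq_true, Bool.not_true, Bool.false_or, Bool.and_eq_true,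
      decide_eq_true_iff] at hc
    obtain ⟨hc1, hc2⟩ := hc
    have hin : i < n.toNat := by omega
    refine ⟨by rw [hRlen]; exact hin, ?_⟩
    rw [hbase i hin]
    by_cases hsh : 0 ≤ (i : Int) + shift
    · rw [if_pos hsh] at hc2 ⊢
      exact hc2
    · rw [if_neg hsh] at hc2 ⊢
      simpa using hc2
  -- unfold both ports
  simp only [initiate_rocks, initiate_rocks_alt, ← hrock]
  rw [pv_resize_eq highest_rock (3 + (rock.length : Int)) chamber (by rw [hn] at ht; omega)]
  have he : highest_rock + (3 + ((rock.length : Nat) : Int)) = n := by rw [hn]; ring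
  rw [he, ← hR, ← hn, ← hshift]
  -- A's nested fold as a set-based fold
  have hfa : (fun (ch : List (List String)) (i : Nat) =>
      (List.range ((rock.getD i []).length)).foldl (fun ch j =>
        if (rock.getD i []).getD j "" = "#" then ch.set i (((ch.getD i []).set (j + 2)) "@") else ch) ch)
      = (fun (ch : List (List String)) (i : Nat) =>
          ch.set i ((List.range ((rock.getD i []).length)).foldl
            (fun r j => if (rock.getD i []).getD j "" = "#" then r.set (j + 2) "@" else r) (ch.getD i []))) := by
    funext ch i
    exact pv_inner_set _ i _ ch
  rw [hfa]
  -- compare elementwise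
  apply List.ext_getElem
  · rw [pv_foldA_len rock, hRlen, List.length_map, List.length_range]
  · intro m hA hB
    have hmn : m < n.toNat := by rwa [List.length_map, List.length_range] at hB
    have hAget : ((List.range rock.length).foldl (fun ch i =>
          ch.set i ((List.range ((rock.getD i []).length)).foldl
            (fun r j => if (rock.getD i []).getD j "" = "#" then r.set (j + 2) "@" else r) (ch.getD i []))) R)[m]
        = if m < rock.length then
            (List.range ((rock.getD m []).length)).foldl
              (fun r j => if (rock.getD m []).getD j "" = "#" then r.set (j + 2) "@" else r) (R.getD m [])
          else R.getD m [] := by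
      rw [List.getElem_eq_getD (fallback := ([] : List String))]
      exact pv_foldA_getD rock rock.length R m
    rw [hAget]
    have hBget : ((List.range n.toNat).map (fun (i : Nat) =>
          if i < rock.length then
            pvStampRow (rock.getD i [])
              (if 0 ≤ (i : Int) + shift then chamber.getD ((i : Int) + shift).toNat [] else List.replicate 7 ".")
          else (if 0 ≤ (i : Int) + shift then chamber.getD ((i : Int) + shift).toNat [] else List.replicate 7 ".")))[m]'hB
        = if m < rock.length then pvStampRow (rock.getD m []) (R.getD m []) else R.getD m [] := by
      rw [List.getElem_map, List.getElem_range, hbase m hmn]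
    rw [hBget]
    by_cases hmr : m < rock.length
    · rw [if_pos hmr, if_pos hmr,
        pv_row_fold_eq_stampRow _ _ (fun j hj hs => (hcells m hmr j hj hs).2)]
    · rw [if_neg hmr, if_neg hmr]

-- ===== VERDICT (by name: the statement is the Claim_ definition above) =====
theorem initiate_rocks_spec : Claim_equal_initiate_rocks := by
  intro rocks chamber rock_type highest_rock _ hpre
  exact pv_main rocks chamber rock_type highest_rock hpre
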